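-- pv_equiv track=rewrite | github.com/Studia-Politechnika-Bialostocka/bsk_algorytmy_szyfrujace | algorytmy_impl.py | PM
-- ===== SOURCE A (Python) =====
-- import math
--
-- def PM(text, d=5, key=[3, 4, 1, 5, 2]):
--     if len(text) <= 0:
--         return "Nie wprowadzono tekstu"
--
--     matrix = [["_" for i in range(d)] for j in range(math.ceil(len(text) / d))]
--
--     row = 0
--     for i in range(len(text)):
--         matrix[row][i % d] = text[i]
--         if i % d == d - 1:
--             row += 1
--
--     encrypted = ""
--     row = 0
--     for i in range(len(matrix)):
--         for j in range(len(key)):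
--             # if matrix[i][key[j] - 1] != "_":
--                 encrypted += matrix[i][key[j] - 1]
--
--     return encrypted
-- ===== SOURCE B (Python) =====
-- def PM(text, d=5, key=[3, 4, 1, 5, 2]):
--     if len(text) <= 0:
--         return "Nie wprowadzono tekstu"
--     encrypted = ""
--     for i in range(0, len(text), d):
--         chunk = text[i:i+d]
--         chunk += "_" * (d - len(chunk))
--         for k in key:
--             encrypted += chunk[k - 1]
--     return encrypted
-- ===== Notes on version B (the rewrite author's own statement) =====
-- stated objective: simpler
-- what changed: B drops the 2D matrix and the row/column bookkeeping entirely: it slices the text into chunks of length d, right-pads each chunk with '_' to exactly d, and reads the key-indexed positions straight off each chunk.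
import Mathlib
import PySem

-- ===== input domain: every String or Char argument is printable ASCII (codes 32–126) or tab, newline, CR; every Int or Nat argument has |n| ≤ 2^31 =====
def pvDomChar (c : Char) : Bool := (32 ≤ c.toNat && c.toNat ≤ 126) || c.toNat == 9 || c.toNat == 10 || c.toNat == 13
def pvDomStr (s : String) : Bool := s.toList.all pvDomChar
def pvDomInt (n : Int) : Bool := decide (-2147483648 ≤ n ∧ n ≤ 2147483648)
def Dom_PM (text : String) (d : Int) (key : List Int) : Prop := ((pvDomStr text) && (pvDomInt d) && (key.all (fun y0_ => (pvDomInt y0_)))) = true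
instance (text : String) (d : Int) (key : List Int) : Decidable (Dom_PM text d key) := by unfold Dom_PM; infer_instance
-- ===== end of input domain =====

-- B replaces A's 2D matrix + row counter by slicing the text into '_'-padded chunks of
-- length d and reading the key positions off each chunk (objective: simpler).

-- ===== PORT A =====
-- matrix cells are single characters in Python; ported as Char. math.ceil(len(text)/d) is
-- ported as the exact integer ceiling -((-n)//d), exact for Dom-sized values; the second
-- 'row = 0' of A is dead (the variable is never read in the output loop) and has no port.
def PM (text : String) (d : Int) (key : List Int) : String :=
  let t := text.toList
  let n : Int := t.length
  if n ≤ 0 then "Nie wprowadzono tekstu"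
  else
    let rows : Int := -(PySem.Int.floordiv (-n) d)
    let matrix0 : List (List Char) :=
      (PySem.List.pyRange 0 rows 1).map (fun _ => (PySem.List.pyRange 0 d 1).map (fun _ => '_'))
    let st := (PySem.List.pyRange 0 n 1).foldl
      (fun (s : List (List Char) × Int) i =>
        (PySem.List.pySetD s.1 s.2
            (PySem.List.pySetD (PySem.List.pyGetD s.1 s.2 []) (PySem.Int.mod i d)
              (PySem.List.pyGetD t i '_')),
         if PySem.Int.mod i d = d - 1 then s.2 + 1 else s.2))
      (matrix0, 0)
    let matrix := st.1
    let encrypted := (PySem.List.pyRange 0 (matrix.length : Int) 1).foldl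
      (fun acc i => (PySem.List.pyRange 0 (key.length : Int) 1).foldl
        (fun acc2 j =>
          acc2 ++ [PySem.List.pyGetD (PySem.List.pyGetD matrix i []) (PySem.List.pyGetD key j 0 - 1) '_'])
        acc)
      []
    String.ofList encrypted

-- ===== PORT B =====
def PM_alt (text : String) (d : Int) (key : List Int) : String :=
  let t := text.toList
  if (t.length : Int) ≤ 0 then "Nie wprowadzono tekstu"
  else
    let encrypted := (PySem.List.pyRange 0 (t.length : Int) d).foldl
      (fun acc i =>
        let chunk := PySem.List.slice t (some i) (some (i + d))
        let chunk := chunk ++ List.replicate (d - (chunk.length : Int)).toNat '_'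
        key.foldl (fun acc2 k => acc2 ++ [PySem.List.pyGetD chunk (k - 1) '_']) acc)
      []
    String.ofList encrypted

-- ===== PRECONDITION & SPEC =====
-- Pre_ excludes only inputs where A raises: on nonempty text, d ≤ 0 breaks the matrix
-- construction / fill (ZeroDivisionError or IndexError), and a key entry outside
-- [1-d, d] makes matrix[i][key[j]-1] an IndexError.
def Pre_PM (text : String) (d : Int) (key : List Int) : Prop :=
  text = "" ∨ (1 ≤ d ∧ ∀ k ∈ key, 1 - d ≤ k ∧ k ≤ d)
instance (text : String) (d : Int) (key : List Int) : Decidable (Pre_PM text d key) := by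
  unfold Pre_PM; infer_instance
def pvWitness_PM : String × Int × List Int := ("abcde", 3, [2, 1, 0, 3])
def Spec_PM (text : String) (d : Int) (key : List Int) (out : String) : Prop := out = PM_alt text d key
instance (text : String) (d : Int) (key : List Int) (out : String) : Decidable (Spec_PM text d key out) := by unfold Spec_PM; infer_instance

-- ===== CLAIM (what is proved, stated in full; the proofs are below) =====
def Claim_equal_PM : Prop := ∀ (text : String) (d : Int) (key : List Int), Dom_PM text d key → Pre_PM text d key → Spec_PM text d key (PM text d key)

-- ===== LEMMAS AND PROOFS =====

def pvRow (t : List Char) (dn : Nat) (m : Nat) (r : Nat) : List Char :=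
  (List.range dn).map (fun c => if r * dn + c < m then t.getD (r * dn + c) '_' else '_')

def pvMat (t : List Char) (dn R m : Nat) : List (List Char) :=
  (List.range R).map (pvRow t dn m)

theorem set_map_range {α : Type} (R r : Nat) (f : Nat → α) (v : α) :
    ((List.range R).map f).set r v = (List.range R).map (fun x => if x = r then v else f x) := by
  apply List.ext_getElem (by simp)
  intro i h1 h2
  simp only [List.getElem_set, List.getElem_map, List.getElem_range]
  by_cases h : i = r
  · subst h
    rfl
  · rw [if_neg (fun hh => h hh.symm), if_neg h]

theorem succ_div_if (m dn : Nat) (hd : 1 ≤ dn) :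
    (m + 1) / dn = if m % dn = dn - 1 then m / dn + 1 else m / dn := by
  have h := Nat.div_add_mod m dn
  have h2 := Nat.mod_lt m (show 0 < dn by omega)
  by_cases hmod : m % dn = dn - 1
  · rw [if_pos hmod]
    have e : dn * (m / dn + 1) = dn * (m / dn) + dn := by ring
    exact ((Nat.div_mod_unique (b := dn) (a := m + 1) (d := m / dn + 1) (c := 0)
      (show 0 < dn by omega)).2 ⟨by omega, by omega⟩).1
  · rw [if_neg hmod]
    exact ((Nat.div_mod_unique (b := dn) (a := m + 1) (d := m / dn) (c := m % dn + 1)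
      (show 0 < dn by omega)).2 ⟨(show m % dn + 1 + dn * (m / dn) = m + 1 by omega), by omega⟩).1

theorem fill_inv (t : List Char) (dn R : Nat) (hd : 1 ≤ dn) (m : Nat)
    (hm : m ≤ t.length) (hn : t.length ≤ R * dn) :
    (PySem.List.pyRange 0 (m : Int) 1).foldl
      (fun (s : List (List Char) × Int) i =>
        (PySem.List.pySetD s.1 s.2
            (PySem.List.pySetD (PySem.List.pyGetD s.1 s.2 []) (PySem.Int.mod i (dn : Int))
              (PySem.List.pyGetD t i '_')),
         if PySem.Int.mod i (dn : Int) = (dn : Int) - 1 then s.2 + 1 else s.2))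
      (pvMat t dn R 0, 0)
    = (pvMat t dn R m, ((m / dn : Nat) : Int)) := by
  induction m with
  | zero =>
    rw [PySem.List.pyRange_one_eq_nil (by norm_num)]
    simp only [List.foldl_nil, Nat.zero_div, Nat.cast_zero]
  | succ m ih =>
    have hm' : m ≤ t.length := by omega
    have hmlt : m < t.length := by omega
    have hrow : m / dn < R := by
      rw [Nat.div_lt_iff_lt_mul (by omega)]; omega
    have hcast : ((m + 1 : Nat) : Int) = (m : Int) + 1 := by push_cast; ring
    rw [hcast, PySem.List.pyRange_one_succ_right (by positivity), List.foldl_append,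
      ih hm']
    simp only [List.foldl_cons, List.foldl_nil, PySem.Int.mod_natCast,
      PySem.List.pyGetD_natCast, PySem.List.pySetD_natCast, Prod.mk.injEq]
    refine ⟨?_, ?_⟩
    · -- matrix component
      have hget : (pvMat t dn R m).getD (m / dn) [] = pvRow t dn m (m / dn) := by
        unfold pvMat
        rw [List.getD_eq_getElem?_getD, List.getElem?_map]
        simp [hrow]
      rw [hget]
      unfold pvRow pvMat
      rw [set_map_range, set_map_range]
      apply List.map_congr_left
      intro r hr
      simp only [List.mem_range] at hr
      have hdm := Nat.div_add_mod m dn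
      have hml := Nat.mod_lt m (show 0 < dn by omega)
      by_cases hreq : r = m / dn
      · subst hreq
        rw [if_pos rfl]
        apply List.map_congr_left
        intro c hc
        simp only [List.mem_range] at hc
        have hmc : dn * (m / dn) = m / dn * dn := Nat.mul_comm dn (m / dn)
        by_cases hceq : c = m % dn
        · rw [if_pos hceq]
          have he : m / dn * dn + c = m := by subst hceq; omega
          rw [he, if_pos (by omega)]
        · rw [if_neg hceq]
          have hne : m / dn * dn + c ≠ m := by
            intro habs
            have := (Nat.div_mod_unique (b := dn) (a := m) (d := m / dn) (c := c)
              (show 0 < dn by omega)).2 ⟨by omega, hc⟩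
            omega
          by_cases hlt : m / dn * dn + c < m
          · rw [if_pos hlt, if_pos (by omega)]
          · rw [if_neg hlt, if_neg (by omega)]
      · rw [if_neg hreq]
        unfold pvRow
        apply List.map_congr_left
        intro c hc
        simp only [List.mem_range] at hc
        have hmc : dn * r = r * dn := Nat.mul_comm dn r
        have hne : r * dn + c ≠ m := by
          intro habs
          have := (Nat.div_mod_unique (b := dn) (a := m) (d := r) (c := c)
            (show 0 < dn by omega)).2 ⟨by omega, hc⟩
          omega
        by_cases hlt : r * dn + c < m
        · rw [if_pos hlt, if_pos (by omega)]
        · rw [if_neg hlt, if_neg (by omega)]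
    · -- row component
      rw [succ_div_if m dn hd]
      have hml := Nat.mod_lt m (show 0 < dn by omega)
      by_cases hmod : m % dn = dn - 1
      · rw [if_pos (show ((m % dn : Nat) : Int) = (dn : Int) - 1 by omega), if_pos hmod]
        push_cast; ring
      · rw [if_neg (show ¬ ((m % dn : Nat) : Int) = (dn : Int) - 1 by omega), if_neg hmod]

theorem ceil_bounds (n dn : Nat) (h1 : 1 ≤ n) (hd : 1 ≤ dn) :
    n ≤ ((n + dn - 1) / dn) * dn ∧ (((n + dn - 1) / dn) - 1) * dn < n := by
  have h := Nat.div_add_mod (n + dn - 1) dn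
  have h2 := Nat.mod_lt (n + dn - 1) (show 0 < dn by omega)
  have h3 : ((n + dn - 1) / dn - 1) * dn = ((n + dn - 1) / dn) * dn - dn := by
    rw [Nat.sub_mul, Nat.one_mul]
  have h4 : dn * ((n + dn - 1) / dn) = ((n + dn - 1) / dn) * dn := Nat.mul_comm _ _
  omega

theorem ceil_pos (n dn : Nat) (h1 : 1 ≤ n) (hd : 1 ≤ dn) : 1 ≤ (n + dn - 1) / dn := by
  rw [Nat.one_le_div_iff (by omega)]; omega

theorem rows_eq (n dn : Nat) (h1 : 1 ≤ n) (hd : 1 ≤ dn) :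
    -(PySem.Int.floordiv (-(n : Int)) (dn : Int)) = (((n + dn - 1) / dn : Nat) : Int) := by
  have hb := ceil_bounds n dn h1 hd
  have hp := ceil_pos n dn h1 hd
  rw [PySem.Int.neg_floordiv_neg_eq_iff_of_pos (by exact_mod_cast hd)]
  constructor
  · have hc : ((((n + dn - 1) / dn : Nat) : Int) - 1) = (((n + dn - 1) / dn - 1 : Nat) : Int) := by
      rw [Nat.cast_sub hp]; simp
    rw [hc]
    exact_mod_cast hb.2
  · exact_mod_cast hb.1

theorem cntB_eq (n dn : Nat) (h1 : 1 ≤ n) (hd : 1 ≤ dn) :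
    (((n : Int) - 0 + (dn : Int) - 1) / (dn : Int)).toNat = (n + dn - 1) / dn := by
  have : ((n : Int) - 0 + (dn : Int) - 1) = (((n + dn - 1 : Nat)) : Int) := by omega
  rw [this, ← Int.natCast_div, Int.toNat_natCast]

theorem chunk_row (t : List Char) (dn r : Nat) (hr : dn * r < t.length) :
    List.take dn (List.drop (dn * r) t) ++
      List.replicate (((dn : Int) - ((List.take dn (List.drop (dn * r) t)).length : Int)).toNat) '_'
    = pvRow t dn t.length r := by
  have hlen : (List.take dn (List.drop (dn * r) t)).length = min dn (t.length - dn * r) := by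
    simp
  have hle : (List.take dn (List.drop (dn * r) t)).length ≤ dn := by omega
  have hcast : (((dn : Int) - ((List.take dn (List.drop (dn * r) t)).length : Int)).toNat)
      = dn - (List.take dn (List.drop (dn * r) t)).length := by omega
  rw [hcast]
  apply List.ext_getElem
  · simp [pvRow]
  · intro i hi1 hi2
    have hidn : i < dn := by simp [pvRow] at hi2; omega
    have hcomm : r * dn = dn * r := Nat.mul_comm r dn
    unfold pvRow
    simp only [List.getElem_map, List.getElem_range]
    by_cases hlt : i < (List.take dn (List.drop (dn * r) t)).length
    · rw [List.getElem_append_left hlt]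
      have hin : dn * r + i < t.length := by omega
      rw [List.getElem_take, List.getElem_drop]
      rw [if_pos (by omega)]
      rw [List.getD_eq_getElem?_getD, List.getElem?_eq_getElem (show r * dn + i < t.length by omega)]
      simp only [Option.getD_some]
      have hidx : dn * r + i = r * dn + i := by omega
      simp only [hidx]
    · rw [List.getElem_append_right (by omega)]
      rw [if_neg (by omega)]
      simp [List.getElem_replicate]

theorem outA (matrix : List (List Char)) (key : List Int) :
    (PySem.List.pyRange 0 (matrix.length : Int) 1).foldl
      (fun acc i => (PySem.List.pyRange 0 (key.length : Int) 1).foldl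
        (fun acc2 j =>
          acc2 ++ [PySem.List.pyGetD (PySem.List.pyGetD matrix i []) (PySem.List.pyGetD key j 0 - 1) '_'])
        acc) []
    = matrix.flatMap (fun row => key.map (fun k => PySem.List.pyGetD row (k - 1) '_')) := by
  have hin : ∀ (row : List Char) (acc : List Char),
      (PySem.List.pyRange 0 (key.length : Int) 1).foldl
        (fun acc2 j => acc2 ++ [PySem.List.pyGetD row (PySem.List.pyGetD key j 0 - 1) '_']) acc
      = acc ++ key.map (fun k => PySem.List.pyGetD row (k - 1) '_') := by
    intro row acc
    rw [PySem.List.foldl_pyRange_zero_pyGetD' key 0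
      (fun acc2 k => acc2 ++ [PySem.List.pyGetD row (k - 1) '_']) acc]
    rw [PySem.List.foldl_append_singleton_eq_map]
  simp only [hin]
  rw [PySem.List.foldl_pyRange_zero_pyGetD' matrix []
    (fun acc row => acc ++ key.map (fun k => PySem.List.pyGetD row (k - 1) '_')) []]
  rw [PySem.List.foldl_append_eq_flatMap]
  simp

theorem mat0 (t : List Char) (dn R : Nat) :
    (PySem.List.pyRange 0 (R : Int) 1).map (fun _ => (PySem.List.pyRange 0 (dn : Int) 1).map (fun _ => '_'))
    = pvMat t dn R 0 := by
  rw [PySem.List.pyRange_zero_nat, PySem.List.pyRange_zero_nat]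
  unfold pvMat pvRow
  simp [List.map_map, Function.comp_def, List.map_const', List.length_range]

theorem PM_ab_eq : ∀ (text : String) (d : Int) (key : List Int), Pre_PM text d key → Spec_PM text d key (PM text d key) := by
  intro text d key hpre
  unfold Spec_PM
  by_cases htext : text.toList = []
  · simp only [PM, PM_alt, htext]
    norm_num
  · have hn : 1 ≤ text.toList.length := by
      have := List.length_pos_iff.mpr htext; omega
    have htxt' : text ≠ "" := fun h => htext (by rw [h]; rfl)
    rcases hpre with h | ⟨hd1, hkey⟩
    · exact absurd h htxt'
    obtain ⟨dn, rfl⟩ : ∃ dn : Nat, d = (dn : Int) := ⟨d.toNat, by omega⟩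
    have hdn : 1 ≤ dn := by exact_mod_cast hd1
    simp only [PM, PM_alt]
    rw [if_neg (by omega), if_neg (by omega)]
    rw [rows_eq text.toList.length dn hn hdn]
    rw [mat0 text.toList dn ((text.toList.length + dn - 1) / dn)]
    rw [fill_inv text.toList dn ((text.toList.length + dn - 1) / dn) hdn text.toList.length le_rfl
      (ceil_bounds text.toList.length dn hn hdn).1]
    dsimp only
    rw [outA]
    simp only [PySem.List.foldl_append_singleton_eq_map]
    rw [PySem.List.foldl_append_eq_flatMap, List.nil_append]
    rw [PySem.List.pyRange_of_pos 0 (text.toList.length : Int)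
      (show (0:Int) < (dn : Int) by exact_mod_cast hdn)]
    rw [if_pos (show (0:Int) < (text.toList.length : Int) by exact_mod_cast hn)]
    rw [cntB_eq text.toList.length dn hn hdn]
    rw [show (pvMat text.toList dn ((text.toList.length + dn - 1) / dn) text.toList.length)
        = (List.range ((text.toList.length + dn - 1) / dn)).map
            (pvRow text.toList dn text.toList.length) from rfl]
    rw [List.flatMap_map, List.flatMap_map]
    congr 1
    apply List.flatMap_congr
    intro r hr
    simp only [List.mem_range] at hr
    have hb := ceil_bounds text.toList.length dn hn hdn
    have hr2 : dn * r ≤ dn * (((text.toList.length + dn - 1) / dn) - 1) :=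
      Nat.mul_le_mul_left dn (by omega)
    have hr3 : dn * (((text.toList.length + dn - 1) / dn) - 1)
        = (((text.toList.length + dn - 1) / dn) - 1) * dn := Nat.mul_comm _ _
    have hrn : dn * r < text.toList.length := by omega
    have hi : (0 : Int) + (dn : Int) * (r : Int) = ((dn * r : Nat) : Int) := by push_cast; ring
    rw [hi, PySem.List.slice_natCast_add text.toList (dn * r) dn,
      chunk_row text.toList dn r hrn]

-- ===== VERDICT (by name: the statement is the Claim_ definition above) =====
theorem PM_spec : Claim_equal_PM := by
  intro text d key _ hpre
  exact PM_ab_eq text d key hpre
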